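-- pv_equiv track=rewrite | github.com/nquist/ProjectEulerSolutions | Projects 051-060/euler054.py | square_counts
-- ===== SOURCE A (Python) =====
-- def square_counts(nums):
--     vals_counter = []
--     vals_set = set(nums)
--     sqr_sum = 0
--     for i in vals_set:
--         count = nums.count(i)
--         vals_counter.append(count)
--     for j in vals_counter:
--         sqr_sum += j**2
--     return 10*sqr_sum
-- ===== SOURCE B (Python) =====
-- def square_counts(nums):
--     s = sorted(nums)
--     total = 0
--     while s:
--         run = 1
--         while run < len(s) and s[run] == s[0]:
--             run += 1
--         total += run * run
--         s = s[run:]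
--     return 10 * total
-- ===== Notes on version B (the rewrite author's own statement) =====
-- stated objective: faster
-- what changed: Sorts the list once and walks it in a single run-length pass, squaring each run length, instead of building a set and rescanning the whole list with nums.count() for every distinct element.
import Mathlib
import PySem

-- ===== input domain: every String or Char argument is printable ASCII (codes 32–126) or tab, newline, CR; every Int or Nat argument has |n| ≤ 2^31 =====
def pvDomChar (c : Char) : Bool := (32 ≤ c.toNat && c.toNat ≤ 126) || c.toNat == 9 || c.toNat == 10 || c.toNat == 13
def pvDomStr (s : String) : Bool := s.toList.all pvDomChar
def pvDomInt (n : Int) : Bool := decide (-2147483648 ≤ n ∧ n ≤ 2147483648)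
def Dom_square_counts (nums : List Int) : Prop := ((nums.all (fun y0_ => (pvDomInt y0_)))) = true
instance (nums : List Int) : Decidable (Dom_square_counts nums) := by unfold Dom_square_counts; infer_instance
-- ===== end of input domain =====

-- B sorts the list once and walks it in a single run-length pass (square of each run length),
-- replacing A's set plus a full nums.count() rescan per distinct element (faster).
-- A iterates over a Python set only to SUM squared counts, which is order-independent, so the
-- first-insertion order used by PySem.Set is exact.

-- ===== PORT A =====
def square_counts (nums : List Int) : Int :=
  let vals_set : PySem.Set Int := PySem.Set.ofList nums
  let vals_counter : List Int :=
    vals_set.foldl (fun acc i => acc ++ [(PySem.List.count nums i : Int)]) []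
  let sqr_sum : Int := vals_counter.foldl (fun acc j => acc + j ^ 2) 0
  10 * sqr_sum

-- ===== PORT B =====
-- inner while: number of further leading elements of the tail equal to the head
def pvRun (x : Int) : List Int → Nat
  | [] => 0
  | y :: ys => if y = x then pvRun x ys + 1 else 0

-- outer while: strip one run, add the square of its length
def pvGroups : List Int → Int
  | [] => 0
  | x :: xs =>
    let run : Nat := 1 + pvRun x xs
    (run : Int) * (run : Int) + pvGroups (List.drop run (x :: xs))
termination_by l => l.length
decreasing_by simp [List.length_drop]

def square_counts_alt (nums : List Int) : Int :=
  10 * pvGroups (PySem.List.sorted nums (fun x => x) false)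

-- ===== PRECONDITION & SPEC =====
def Spec_square_counts (nums : List Int) (out : Int) : Prop := out = square_counts_alt nums
instance (nums : List Int) (out : Int) : Decidable (Spec_square_counts nums out) := by unfold Spec_square_counts; infer_instance

-- ===== CLAIM (what is proved, stated in full; the proofs are below) =====
def Claim_equal_square_counts : Prop := ∀ (nums : List Int), Dom_square_counts nums → Spec_square_counts nums (square_counts nums)

-- ===== LEMMAS AND PROOFS =====

theorem pvRun_le (x : Int) (xs : List Int) : pvRun x xs ≤ xs.length := by
  induction xs with
  | nil => simp [pvRun]
  | cons y ys ih => simp only [pvRun, List.length_cons]; split <;> omega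


theorem take_pvRun (x : Int) (xs : List Int) :
    xs.take (pvRun x xs) = List.replicate (pvRun x xs) x := by
  induction xs with
  | nil => simp [pvRun]
  | cons y ys ih =>
    simp only [pvRun]
    split
    · next h => subst h; simp [List.replicate_succ, ih]
    · simp

theorem head_drop_pvRun_ne (x : Int) (xs : List Int) {z : Int} {rest : List Int}
    (h : xs.drop (pvRun x xs) = z :: rest) : z ≠ x := by
  induction xs generalizing z rest with
  | nil => simp [pvRun] at h
  | cons y ys ih =>
    simp only [pvRun] at h
    split at h
    · exact ih (by rwa [List.drop_succ_cons] at h)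
    · next hy => rw [List.drop_zero] at h; cases h; exact hy

theorem not_mem_drop_pvRun (x : Int) (xs : List Int)
    (hs : (x :: xs).Pairwise (· ≤ ·)) : x ∉ xs.drop (pvRun x xs) := by
  cases hd : xs.drop (pvRun x xs) with
  | nil => simp
  | cons z rest =>
    have hzx : z ≠ x := head_drop_pvRun_ne x xs hd
    have hxs : xs.Pairwise (· ≤ ·) := hs.of_cons
    have hdp : (z :: rest).Pairwise (· ≤ ·) := hd ▸ hxs.sublist (List.drop_sublist _ _)
    have hzmem : z ∈ xs := by
      have hz : z ∈ xs.drop (pvRun x xs) := by rw [hd]; exact List.mem_cons_self ..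
      exact (List.drop_sublist _ _).mem hz
    have hxz : x ≤ z := (List.pairwise_cons.mp hs).1 z hzmem
    intro hmem
    rcases List.mem_cons.mp hmem with h | h
    · exact hzx h.symm
    · have hzle : z ≤ x := (List.pairwise_cons.mp hdp).1 x h
      exact hzx (le_antisymm hzle hxz)

theorem decompose_pvRun (x : Int) (xs : List Int) :
    xs = List.replicate (pvRun x xs) x ++ xs.drop (pvRun x xs) := by
  conv_lhs => rw [← List.take_append_drop (pvRun x xs) xs]
  rw [take_pvRun]

theorem count_head_sorted (x : Int) (xs : List Int)
    (hs : (x :: xs).Pairwise (· ≤ ·)) :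
    (x :: xs).count x = pvRun x xs + 1 := by
  rw [List.count_cons_self]
  conv_lhs => rw [decompose_pvRun x xs]
  rw [List.count_append, List.count_replicate_self,
      List.count_eq_zero.mpr (not_mem_drop_pvRun x xs hs)]

theorem count_other (x i : Int) (xs : List Int) (hix : i ≠ x) :
    (x :: xs).count i = (xs.drop (pvRun x xs)).count i := by
  rw [List.count_cons, if_neg (by simpa using Ne.symm hix), Nat.add_zero]
  conv_lhs => rw [decompose_pvRun x xs]
  rw [List.count_append, List.count_replicate, if_neg (by simpa using Ne.symm hix), Nat.zero_add]

-- run-length decomposition of a sorted list computes the sum of squared multiplicities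
theorem pvGroups_sorted_eq (l : List Int) (hs : l.Pairwise (· ≤ ·)) :
    pvGroups l = ((PySem.Set.ofList l).map (fun i => ((l.count i : Int)) ^ 2)).sum := by
  induction hn : l.length using Nat.strong_induction_on generalizing l with
  | _ n ih =>
  cases l with
  | nil => rw [pvGroups]; simp [PySem.Set.ofList]
  | cons x xs =>
    set k := pvRun x xs with hk
    set d := xs.drop k with hdd
    have hdl : d.length = xs.length - k := by simp [hdd]
    have hkle : k ≤ xs.length := pvRun_le x xs
    have hxd : x ∉ d := not_mem_drop_pvRun x xs hs
    have hdpair : d.Pairwise (· ≤ ·) := hs.of_cons.sublist (List.drop_sublist _ _)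
    have hn' : xs.length + 1 = n := by simpa using hn
    have hlt : d.length < n := by omega
    have hih : pvGroups d = ((PySem.Set.ofList d).map (fun i => ((d.count i : Int)) ^ 2)).sum :=
      ih d.length hlt d hdpair rfl
    -- left side unfolds to (k+1)^2 + pvGroups d
    have hdrop : List.drop (1 + pvRun x xs) (x :: xs) = d := by
      rw [Nat.add_comm 1 (pvRun x xs)]; simp [List.drop_succ_cons, hdd, hk]
    have hleft : pvGroups (x :: xs) = ((k : Int) + 1) * ((k : Int) + 1) + pvGroups d := by
      rw [pvGroups, hdrop]
      simp only [← hk]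
      push_cast; ring_nf
    -- the distinct elements of x :: xs are a permutation of x :: distinct elements of d
    have hmemxs : ∀ i, i ∈ x :: xs ↔ i = x ∨ i ∈ d := by
      intro i
      constructor
      · intro h
        rcases List.mem_cons.mp h with h | h
        · exact Or.inl h
        · conv at h => rw [decompose_pvRun x xs]
          rcases List.mem_append.mp h with h | h
          · exact Or.inl (List.eq_of_mem_replicate h)
          · exact Or.inr h
      · rintro (rfl | h)
        · exact List.mem_cons_self ..
        · exact List.mem_cons_of_mem _ ((List.drop_sublist _ _).mem h)
    have hperm : (PySem.Set.ofList (x :: xs)).Perm (x :: PySem.Set.ofList d) := by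
      rw [List.perm_ext_iff_of_nodup (PySem.Set.nodup_ofList _)
        (by simp [List.nodup_cons, PySem.Set.nodup_ofList, PySem.Set.mem_ofList, hxd])]
      intro i
      simp only [PySem.Set.mem_ofList, List.mem_cons, hmemxs]
    have hsum : ((PySem.Set.ofList (x :: xs)).map (fun i => (((x :: xs).count i : Int)) ^ 2)).sum
        = (((x :: xs).count x : Int)) ^ 2
          + ((PySem.Set.ofList d).map (fun i => (((x :: xs).count i : Int)) ^ 2)).sum := by
      rw [(hperm.map _).sum_eq]; simp
    rw [hleft, hih, hsum, count_head_sorted x xs hs]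
    have hcong : ((PySem.Set.ofList d).map (fun i => (((x :: xs).count i : Int)) ^ 2))
        = ((PySem.Set.ofList d).map (fun i => ((d.count i : Int)) ^ 2)) := by
      apply List.map_congr_left
      intro i hi
      have hid : i ∈ d := (PySem.Set.mem_ofList _ _).mp hi
      have hix : i ≠ x := fun h => hxd (h ▸ hid)
      rw [count_other x i xs hix, ← hdd]
    rw [hcong]
    push_cast; ring

theorem square_counts_eq (nums : List Int) :
    square_counts nums
      = 10 * (((PySem.Set.ofList nums).map
          (fun i => ((PySem.List.count nums i : Int)) ^ 2)).sum) := by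
  unfold square_counts
  dsimp only
  rw [PySem.List.foldl_append_singleton_eq_map,
      PySem.List.foldl_add (g := fun j => j ^ 2)]
  simp [List.map_map, Function.comp_def]

-- ===== VERDICT (by name: the statement is the Claim_ definition above) =====
theorem square_counts_spec : Claim_equal_square_counts := by
  intro nums _
  unfold Spec_square_counts square_counts_alt
  set s := PySem.List.sorted nums (fun x => x) false with hsdef
  have hperm : s.Perm nums := PySem.List.sorted_perm ..
  have hpw : s.Pairwise (· ≤ ·) := by
    have := PySem.List.sorted_pairwise (xs := nums) (key := fun x : Int => x)
    simpa [hsdef] using this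
  rw [square_counts_eq, pvGroups_sorted_eq s hpw]
  congr 1
  have hsetperm : (PySem.Set.ofList nums).Perm (PySem.Set.ofList s) := by
    rw [List.perm_ext_iff_of_nodup (PySem.Set.nodup_ofList _) (PySem.Set.nodup_ofList _)]
    intro i
    simp only [PySem.Set.mem_ofList]
    exact ⟨fun h => hperm.mem_iff.mpr h, fun h => hperm.mem_iff.mp h⟩
  rw [(hsetperm.map _).sum_eq]
  refine congrArg List.sum (List.map_congr_left ?_)
  intro i _
  rw [PySem.List.count_eq, hperm.count_eq]
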